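-- pv_equiv track=rewrite | github.com/iSpellcaster/pico8rle | pico8rle.py | base64encode
-- ===== SOURCE A (Python) =====
-- import math
--
-- def base64encode(value):
-- 	base64str='0123456789abcdefghijklmnopqrstuvwxyz!@#$%^&*()_-+=[]}{;:<>,./?~|'
-- 	b64result=""
-- 	if value == 0:
-- 		return "00"
-- 	else:
-- 		while value > 0:
-- 			i=value%64
-- 			b64result=base64str[i:i+1] + b64result
-- 			value=math.floor(value/64)
-- 		return b64result
-- ===== SOURCE B (Python) =====
-- def base64encode(value):
-- 	base64str='0123456789abcdefghijklmnopqrstuvwxyz!@#$%^&*()_-+=[]}{;:<>,./?~|'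
-- 	def digits(v):
-- 		if v <= 0:
-- 			return ""
-- 		return digits(v // 64) + base64str[v % 64]
-- 	if value == 0:
-- 		return "00"
-- 	return digits(value)
-- ===== Notes on version B (the rewrite author's own statement) =====
-- stated objective: alternative
-- what changed: Replaces the iterative while-loop with string-prepend accumulator by a recursive helper expressing the base-64 digit recurrence, concatenating most-significant digits on the way back from the recursion.
import Mathlib
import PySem

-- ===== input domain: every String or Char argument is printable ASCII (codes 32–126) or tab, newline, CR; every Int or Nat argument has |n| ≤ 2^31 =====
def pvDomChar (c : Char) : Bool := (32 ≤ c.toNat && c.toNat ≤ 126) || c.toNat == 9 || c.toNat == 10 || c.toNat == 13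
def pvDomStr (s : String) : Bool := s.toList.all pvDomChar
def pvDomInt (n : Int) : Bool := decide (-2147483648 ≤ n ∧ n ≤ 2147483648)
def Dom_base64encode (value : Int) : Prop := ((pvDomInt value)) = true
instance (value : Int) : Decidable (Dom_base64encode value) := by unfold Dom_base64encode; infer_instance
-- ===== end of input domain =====

-- B replaces A's while-loop with a string-prepend accumulator by the natural base-64 digit
-- recursion (helper(v//64) + digit); same values on every Int input, no speed claim.

-- ===== PORT A =====
-- the custom alphabet, as a character list (strings are ported via List Char per PySem)
def pvB64chars : List Char :=
  "0123456789abcdefghijklmnopqrstuvwxyz!@#$%^&*()_-+=[]}{;:<>,./?~|".toList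

-- A's 'while value > 0' loop; math.floor(value/64) is exact = value // 64 on the Int domain
def pvLoopA (value : Int) (acc : List Char) : List Char :=
  if h : value > 0 then
    pvLoopA (PySem.Int.floordiv value 64)
      (PySem.List.slice pvB64chars (some (PySem.Int.mod value 64))
        (some (PySem.Int.mod value 64 + 1)) ++ acc)
  else acc
termination_by value.toNat
decreasing_by
  rw [PySem.Int.floordiv_eq_ediv_of_pos (by norm_num)]
  omega

def base64encode (value : Int) : String :=
  if value == 0 then "00" else String.ofList (pvLoopA value [])

-- ===== PORT B =====
-- B's recursive digit expansion: digits(v) = digits(v // 64) + base64str[v % 64]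
-- (the index v % 64 is always in range, so the pyGetD default is never read)
def pvDigitsB (v : Int) : List Char :=
  if h : v ≤ 0 then []
  else pvDigitsB (PySem.Int.floordiv v 64) ++ [PySem.List.pyGetD pvB64chars (PySem.Int.mod v 64) '?']
termination_by v.toNat
decreasing_by
  rw [PySem.Int.floordiv_eq_ediv_of_pos (by norm_num)]
  omega

def base64encode_alt (value : Int) : String :=
  if value == 0 then "00" else String.ofList (pvDigitsB value)

-- ===== PRECONDITION & SPEC =====
def Spec_base64encode (value : Int) (out : String) : Prop := out = base64encode_alt value
instance (value : Int) (out : String) : Decidable (Spec_base64encode value out) := by unfold Spec_base64encode; infer_instance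

-- ===== CLAIM (what is proved, stated in full; the proofs are below) =====
def Claim_equal_base64encode : Prop := ∀ (value : Int), Dom_base64encode value → Spec_base64encode value (base64encode value)

-- ===== LEMMAS AND PROOFS =====

-- A's one-character slice is B's one-character index, for any in-range index
lemma pv_digit_eq (i : Int) (h0 : 0 ≤ i) (h1 : i < 64) :
    PySem.List.slice pvB64chars (some i) (some (i + 1))
      = [PySem.List.pyGetD pvB64chars i '?'] := by
  have hlen : pvB64chars.length = 64 := by decide
  rw [PySem.List.slice_toNat (ha := h0) (hb := by omega),
      PySem.List.pyGetD_eq_getElem (h0 := h0) (h1 := by omega)]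
  have hn : i.toNat < pvB64chars.length := by omega
  have h1' : (i + 1).toNat - i.toNat = 1 := by omega
  rw [h1', List.drop_eq_getElem_cons hn]
  simp only [List.take_succ_cons, List.take_zero]

-- loop invariant: A's loop with accumulator acc computes B's digits followed by acc
lemma pv_loop_eq (n : Nat) : ∀ (v : Int) (acc : List Char), v.toNat ≤ n →
    pvLoopA v acc = pvDigitsB v ++ acc := by
  induction n with
  | zero =>
    intro v acc hv
    rw [pvLoopA, pvDigitsB]
    have : ¬ v > 0 := by omega
    have hle : v ≤ 0 := by omega
    simp [this, hle]
  | succ n ih =>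
    intro v acc hv
    rw [pvLoopA, pvDigitsB]
    by_cases h : v > 0
    · have hne : ¬ v ≤ 0 := by omega
      simp only [h, hne, dif_pos, dif_neg, not_false_iff]
      have hq : PySem.Int.floordiv v 64 = v / 64 :=
        PySem.Int.floordiv_eq_ediv_of_pos (by norm_num)
      rw [ih _ _ (by rw [hq]; omega),
          pv_digit_eq _ (PySem.Int.mod_nonneg v (by norm_num))
            (PySem.Int.mod_lt v (by norm_num))]
      simp
    · have hle : v ≤ 0 := by omega
      simp [h, hle]

-- ===== VERDICT (by name: the statement is the Claim_ definition above) =====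
theorem base64encode_spec : Claim_equal_base64encode := by
  intro value _
  unfold Spec_base64encode base64encode base64encode_alt
  by_cases h : value = 0
  · simp [h]
  · simp only [h, beq_iff_eq]
    rw [pv_loop_eq value.toNat value [] (le_refl _)]
    simp
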